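-- pv_equiv track=rewrite | github.com/bkachinthay/aoc | 2020/21.py | possible_allerggens
-- ===== SOURCE A (Python) =====
-- def possible_allerggens(parsed):
--     allergen_names = {}
--     for ingredients, allergens in parsed:
--         for allergen in allergens:
--             if allergen not in allergen_names:
--                 allergen_names[allergen] = []
--             allergen_names[allergen].append(set(ingredients))
--     possble_allergen_names = {}
--     for allergen, ingredients in allergen_names.items():
--         possble_allergen_names[allergen] = set.intersection(*ingredients)
--     return possble_allergen_names
-- ===== SOURCE B (Python) =====
-- def possible_allerggens(parsed):
--     result = {}
--     for ingredients, allergens in parsed: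
--         for allergen in allergens:
--             if allergen in result:
--                 result[allergen] = result[allergen] & set(ingredients)
--             else:
--                 result[allergen] = set(ingredients)
--     return result
-- ===== Notes on version B (the rewrite author's own statement) =====
-- stated objective: simpler
-- what changed: Single pass keeping a running intersection set per allergen in one dict, instead of grouping a list of ingredient sets per allergen and then reducing each list with set.intersection in a second loop; the per-allergen list of sets is never materialised.
import Mathlib
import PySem

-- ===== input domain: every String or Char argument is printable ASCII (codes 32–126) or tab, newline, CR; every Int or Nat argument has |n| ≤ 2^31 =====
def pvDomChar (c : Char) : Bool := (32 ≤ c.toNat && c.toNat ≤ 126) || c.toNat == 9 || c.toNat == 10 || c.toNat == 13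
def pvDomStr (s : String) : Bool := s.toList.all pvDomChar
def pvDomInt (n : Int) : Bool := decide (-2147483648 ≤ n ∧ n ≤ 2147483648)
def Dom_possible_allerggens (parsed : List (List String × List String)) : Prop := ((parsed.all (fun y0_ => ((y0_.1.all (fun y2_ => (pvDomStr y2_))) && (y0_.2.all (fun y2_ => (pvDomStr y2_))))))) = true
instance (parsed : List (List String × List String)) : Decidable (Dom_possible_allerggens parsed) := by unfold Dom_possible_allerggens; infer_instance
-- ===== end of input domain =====

-- B keeps one running intersection set per allergen in a single pass, instead of A's
-- list-of-sets grouping followed by a second reduce loop (objective: simpler).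


-- ===== PORT A =====
-- set.intersection(*l): left fold of & over the list; Python raises TypeError on an empty l,
-- which is unreachable here (every stored list gets a set appended right after creation),
-- so the [] case is totalised arbitrarily.
def pvInterAll (l : List (PySem.Set String)) : PySem.Set String :=
  match l with
  | [] => []
  | h :: t => t.foldl PySem.Set.inter h

def possible_allerggens (parsed : List (List String × List String)) : List (String × List String) :=
  let allergen_names : PySem.Dict String (List (PySem.Set String)) :=
    parsed.foldl (fun d p =>
      p.2.foldl (fun d allergen =>
        -- 'if allergen not in d: d[allergen] = []' then 'd[allergen].append(set(ingredients))'
        -- (the in-place append is re-insertion of the extended list)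
        let d := if d.contains allergen then d else d.insert allergen ([] : List (PySem.Set String))
        d.insert allergen (d.getD allergen [] ++ [PySem.Set.ofList p.1])) d) PySem.Dict.empty
  (allergen_names.items.foldl
    (fun d p => d.insert p.1 (pvInterAll p.2))
    (PySem.Dict.empty : PySem.Dict String (PySem.Set String))).items

-- ===== PORT B =====
def possible_allerggens_alt (parsed : List (List String × List String)) : List (String × List String) :=
  (parsed.foldl (fun d p =>
    p.2.foldl (fun d allergen =>
      if d.contains allergen then
        d.insert allergen (PySem.Set.inter (d.getD allergen []) (PySem.Set.ofList p.1))
      else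
        d.insert allergen (PySem.Set.ofList p.1)) d)
    (PySem.Dict.empty : PySem.Dict String (PySem.Set String))).items

-- ===== PRECONDITION & SPEC =====
def Spec_possible_allerggens (parsed : List (List String × List String)) (out : List (String × List String)) : Prop := out = possible_allerggens_alt parsed
instance (parsed : List (List String × List String)) (out : List (String × List String)) : Decidable (Spec_possible_allerggens parsed out) := by unfold Spec_possible_allerggens; infer_instance

-- ===== CLAIM (what is proved, stated in full; the proofs are below) =====
def Claim_equal_possible_allerggens : Prop := ∀ (parsed : List (List String × List String)), Dom_possible_allerggens parsed → Spec_possible_allerggens parsed (possible_allerggens parsed)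

-- ===== LEMMAS AND PROOFS =====

-- the relating map: an A-side dict entry (k, list of sets) corresponds to the B-side entry
-- (k, intersection of the list)
def pvF (p : String × List (PySem.Set String)) : String × PySem.Set String := (p.1, pvInterAll p.2)

def pvPhi (d : PySem.Dict String (List (PySem.Set String))) : PySem.Dict String (PySem.Set String) :=
  PySem.Dict.mk (d.items.map pvF)

theorem pvKeys_phi (d : PySem.Dict String (List (PySem.Set String))) : (pvPhi d).keys = d.keys := by
  simp [pvPhi, PySem.Dict.keys, pvF]

theorem pvContains_phi (d : PySem.Dict String (List (PySem.Set String))) (k : String) :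
    (pvPhi d).contains k = d.contains k := by
  rw [PySem.Dict.contains_eq_decide_mem_keys, PySem.Dict.contains_eq_decide_mem_keys, pvKeys_phi]

theorem pvInterAll_append (v : List (PySem.Set String)) (hv : v ≠ []) (s : PySem.Set String) :
    pvInterAll (v ++ [s]) = PySem.Set.inter (pvInterAll v) s := by
  cases v with
  | nil => exact absurd rfl hv
  | cons h t => simp [pvInterAll, List.foldl_append]

-- one allergen step: B's step on the image dict equals the image of A's step
theorem pvStep_eq (d : PySem.Dict String (List (PySem.Set String))) (hnd : d.keys.Nodup)
    (hne : ∀ p ∈ d.items, p.2 ≠ ([] : List (PySem.Set String))) (a : String) (s : PySem.Set String) :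
    (if (pvPhi d).contains a then
        (pvPhi d).insert a (PySem.Set.inter ((pvPhi d).getD a []) s)
      else
        (pvPhi d).insert a s)
    = pvPhi
      (let d' := if d.contains a then d else d.insert a ([] : List (PySem.Set String))
       d'.insert a (d'.getD a [] ++ [s])) := by
  by_cases h : d.contains a = true
  · simp only [pvContains_phi, h, if_true]
    apply PySem.Dict.ext
    rw [PySem.Dict.items_insert_of_contains _ _ ((pvContains_phi d a).trans h)]
    show _ = (d.insert a (d.getD a [] ++ [s])).items.map pvF
    rw [PySem.Dict.items_insert_of_contains _ _ h]
    show List.map _ (d.items.map pvF) = _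
    rw [List.map_map, List.map_map]
    apply List.map_congr_left
    intro p hp
    by_cases hpa : p.1 = a
    · have hp' : (a, p.2) ∈ d.items := by rw [← hpa]; exact hp
      have hA : d.getD a [] = p.2 := PySem.Dict.getD_of_mem_items d hp' hnd []
      have hndφ : (pvPhi d).keys.Nodup := by rw [pvKeys_phi]; exact hnd
      have hpφ : (a, pvInterAll p.2) ∈ (pvPhi d).items := by
        simp only [pvPhi]
        exact List.mem_map.mpr ⟨p, hp, by simp [pvF, hpa]⟩
      have hB : (pvPhi d).getD a [] = pvInterAll p.2 :=
        PySem.Dict.getD_of_mem_items _ hpφ hndφ []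
      simp only [Function.comp, pvF, hpa, beq_self_eq_true, if_true, hA, hB]
      exact congrArg _ (pvInterAll_append p.2 (hne p hp) s).symm
    · simp only [Function.comp, pvF, beq_iff_eq, hpa, if_false]
  · have h' : d.contains a = false := by simp at h; exact h
    simp only [pvContains_phi, h', if_false, Bool.false_eq_true]
    have hfresh : (d.insert a ([] : List (PySem.Set String))).getD a [] = [] :=
      PySem.Dict.getD_insert_self d a [] []
    apply PySem.Dict.ext
    rw [PySem.Dict.items_insert_of_not_contains _ _ ((pvContains_phi d a).trans h')]
    conv_rhs => rw [hfresh]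
    rw [List.nil_append, PySem.Dict.insert_insert_self]
    simp only [pvPhi]
    rw [PySem.Dict.items_insert_of_not_contains _ _ h', List.map_append]
    simp [pvF, pvInterAll]

theorem pvAstep_nodup (d : PySem.Dict String (List (PySem.Set String))) (hnd : d.keys.Nodup)
    (a : String) (s : PySem.Set String) :
    (let d' := if d.contains a then d else d.insert a ([] : List (PySem.Set String))
     d'.insert a (d'.getD a [] ++ [s])).keys.Nodup := by
  dsimp only
  split_ifs with h
  · exact PySem.Dict.nodup_keys_insert _ _ _ hnd
  · exact PySem.Dict.nodup_keys_insert _ _ _ (PySem.Dict.nodup_keys_insert _ _ _ hnd)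

theorem pvAstep_ne (d : PySem.Dict String (List (PySem.Set String)))
    (hne : ∀ p ∈ d.items, p.2 ≠ ([] : List (PySem.Set String))) (a : String) (s : PySem.Set String) :
    ∀ p ∈ (let d' := if d.contains a then d else d.insert a ([] : List (PySem.Set String))
           d'.insert a (d'.getD a [] ++ [s])).items, p.2 ≠ ([] : List (PySem.Set String)) := by
  dsimp only
  split_ifs with h
  · rw [PySem.Dict.items_insert_of_contains _ _ h]
    intro p hp
    obtain ⟨q, hq, rfl⟩ := List.mem_map.mp hp
    by_cases hqa : (q.1 == a) = true
    · simp [hqa]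
    · simpa [hqa] using hne q hq
  · have h' : d.contains a = false := by simpa using h
    rw [PySem.Dict.getD_insert_self d a [] [], List.nil_append, PySem.Dict.insert_insert_self,
      PySem.Dict.items_insert_of_not_contains _ _ h']
    intro p hp
    rcases List.mem_append.mp hp with hp | hp
    · exact hne p hp
    · simp at hp; simp [hp]

theorem pvInner (ing : List String) (l : List String)
    (d : PySem.Dict String (List (PySem.Set String))) (hnd : d.keys.Nodup)
    (hne : ∀ p ∈ d.items, p.2 ≠ ([] : List (PySem.Set String))) :
    (l.foldl (fun d allergen =>
        if d.contains allergen then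
          d.insert allergen (PySem.Set.inter (d.getD allergen []) (PySem.Set.ofList ing))
        else d.insert allergen (PySem.Set.ofList ing)) (pvPhi d)
      = pvPhi (l.foldl (fun d allergen =>
          let d' := if d.contains allergen then d else d.insert allergen ([] : List (PySem.Set String))
          d'.insert allergen (d'.getD allergen [] ++ [PySem.Set.ofList ing])) d))
    ∧ (l.foldl (fun d allergen =>
          let d' := if d.contains allergen then d else d.insert allergen ([] : List (PySem.Set String))
          d'.insert allergen (d'.getD allergen [] ++ [PySem.Set.ofList ing])) d).keys.Nodup
    ∧ ∀ p ∈ (l.foldl (fun d allergen =>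
          let d' := if d.contains allergen then d else d.insert allergen ([] : List (PySem.Set String))
          d'.insert allergen (d'.getD allergen [] ++ [PySem.Set.ofList ing])) d).items,
        p.2 ≠ ([] : List (PySem.Set String)) := by
  induction l generalizing d with
  | nil => exact ⟨rfl, hnd, hne⟩
  | cons a t ih =>
    simp only [List.foldl_cons]
    rw [pvStep_eq d hnd hne a (PySem.Set.ofList ing)]
    exact ih _ (pvAstep_nodup d hnd a _) (pvAstep_ne d hne a _)

theorem pvOuter (L : List (List String × List String))
    (d : PySem.Dict String (List (PySem.Set String))) (hnd : d.keys.Nodup)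
    (hne : ∀ p ∈ d.items, p.2 ≠ ([] : List (PySem.Set String))) :
    (L.foldl (fun d p => p.2.foldl (fun d allergen =>
        if d.contains allergen then
          d.insert allergen (PySem.Set.inter (d.getD allergen []) (PySem.Set.ofList p.1))
        else d.insert allergen (PySem.Set.ofList p.1)) d) (pvPhi d)
      = pvPhi (L.foldl (fun d p => p.2.foldl (fun d allergen =>
          let d' := if d.contains allergen then d else d.insert allergen ([] : List (PySem.Set String))
          d'.insert allergen (d'.getD allergen [] ++ [PySem.Set.ofList p.1])) d) d))
    ∧ (L.foldl (fun d p => p.2.foldl (fun d allergen =>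
          let d' := if d.contains allergen then d else d.insert allergen ([] : List (PySem.Set String))
          d'.insert allergen (d'.getD allergen [] ++ [PySem.Set.ofList p.1])) d) d).keys.Nodup
    ∧ ∀ q ∈ (L.foldl (fun d p => p.2.foldl (fun d allergen =>
          let d' := if d.contains allergen then d else d.insert allergen ([] : List (PySem.Set String))
          d'.insert allergen (d'.getD allergen [] ++ [PySem.Set.ofList p.1])) d) d).items,
        q.2 ≠ ([] : List (PySem.Set String)) := by
  induction L generalizing d with
  | nil => exact ⟨rfl, hnd, hne⟩
  | cons p t ih =>
    simp only [List.foldl_cons]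
    obtain ⟨h1, h2, h3⟩ := pvInner p.1 p.2 d hnd hne
    rw [h1]
    exact ih _ h2 h3

theorem pvSecondLoop (l : List (String × List (PySem.Set String)))
    (d : PySem.Dict String (PySem.Set String))
    (hc : ∀ p ∈ l, d.contains p.1 = false) (hnd : (l.map (fun p => p.1)).Nodup) :
    (l.foldl (fun d p => d.insert p.1 (pvInterAll p.2)) d).items = d.items ++ l.map pvF := by
  induction l generalizing d with
  | nil => simp
  | cons p t ih =>
    simp only [List.foldl_cons, List.map_cons] at *
    have hne : ∀ q ∈ t, q.1 ≠ p.1 := by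
      intro q hq
      exact fun hcontra => (List.nodup_cons.mp hnd).1 (hcontra ▸ List.mem_map_of_mem hq)
    rw [ih _ (fun q hq => by
        rw [PySem.Dict.contains_insert]
        simp [hne q hq, hc q (List.mem_cons_of_mem p hq)]) (List.nodup_cons.mp hnd).2]
    rw [PySem.Dict.items_insert_of_not_contains _ _ (hc p (List.mem_cons_self ..))]
    simp [pvF]

theorem pvMain (parsed : List (List String × List String)) :
    possible_allerggens parsed = possible_allerggens_alt parsed := by
  have h0nd : (PySem.Dict.empty : PySem.Dict String (List (PySem.Set String))).keys.Nodup :=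
    PySem.Dict.nodup_keys_empty
  have h0ne : ∀ p ∈ (PySem.Dict.empty : PySem.Dict String (List (PySem.Set String))).items,
      p.2 ≠ ([] : List (PySem.Set String)) := by
    intro p hp; simp [PySem.Dict.empty] at hp
  obtain ⟨h1, h2, -⟩ := pvOuter parsed PySem.Dict.empty h0nd h0ne
  unfold possible_allerggens possible_allerggens_alt
  dsimp only
  rw [show pvPhi PySem.Dict.empty = (PySem.Dict.empty : PySem.Dict String (PySem.Set String)) from rfl] at h1
  rw [h1]
  rw [pvSecondLoop _ _ (fun q _ => PySem.Dict.contains_empty q.1)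
    (by simpa [PySem.Dict.keys] using h2)]
  dsimp only
  simp [pvPhi, PySem.Dict.empty]

-- ===== VERDICT (by name: the statement is the Claim_ definition above) =====
theorem possible_allerggens_spec : Claim_equal_possible_allerggens := by
  intro parsed _
  exact pvMain parsed
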